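-- pv_equiv track=rewrite | github.com/Nghia03092004/nghia03092004.github.io | project_euler_unified/problem_833/solution.py | pell_solution_mod
-- ===== SOURCE A (Python) =====
-- def pell_solution_mod(K, mod):
--     """Compute K-th Pell solution (x_K, y_K) mod p using matrix exponentiation."""
--     def mat_mul(A, B, mod):
--         return [
--             [(A[0][0]*B[0][0] + A[0][1]*B[1][0]) % mod,
--              (A[0][0]*B[0][1] + A[0][1]*B[1][1]) % mod],
--             [(A[1][0]*B[0][0] + A[1][1]*B[1][0]) % mod,
--              (A[1][0]*B[0][1] + A[1][1]*B[1][1]) % mod]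
--         ]
--
--     def mat_pow(M, n, mod):
--         result = [[1, 0], [0, 1]]  # identity
--         while n > 0:
--             if n & 1:
--                 result = mat_mul(result, M, mod)
--             M = mat_mul(M, M, mod)
--             n >>= 1
--         return result
--
--     # [x_{k+1}, y_{k+1}] = [[3,4],[2,3]] * [x_k, y_k]
--     # Starting from (x_1, y_1) = (3, 2), the K-th solution is M^{K-1} * [3, 2]
--     M = [[3, 4], [2, 3]]
--     if K == 1:
--         return (3 % mod, 2 % mod)
--     Mk = mat_pow(M, K - 1, mod)
--     x = (Mk[0][0] * 3 + Mk[0][1] * 2) % mod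
--     y = (Mk[1][0] * 3 + Mk[1][1] * 2) % mod
--     return (x, y)
-- ===== SOURCE B (Python) =====
-- def pell_solution_mod(K, mod):
--     """K-th Pell solution mod m by recursive MSB-first fast doubling on the pair
--     (a, b) ~ a + b*sqrt(2) = (3 + 2*sqrt(2))**n: square the half power, then
--     absorb the low bit; one final multiplication by the base yields (x_K, y_K)."""
--     def pw(n):
--         if n <= 0:
--             return (1 % mod, 0)
--         a, b = pw(n >> 1)
--         a, b = (a * a + 2 * b * b) % mod, (2 * a * b) % mod
--         if n & 1:
--             a, b = (3 * a + 4 * b) % mod, (2 * a + 3 * b) % mod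
--         return (a, b)
--     a, b = pw(K - 1)
--     return ((3 * a + 4 * b) % mod, (2 * a + 3 * b) % mod)
-- ===== Notes on version B (the rewrite author's own statement) =====
-- stated objective: alternative
-- what changed: Replaces A's iterative LSB-first binary exponentiation of an explicit 2x2 matrix (accumulator times running squares in mat_mul/mat_pow) by a recursive MSB-first fast-doubling on a single pair (a,b) standing for a+b*sqrt(2): recurse on n>>1, square the result, absorb the low bit; no matrices and no accumulator state.
import Mathlib
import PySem

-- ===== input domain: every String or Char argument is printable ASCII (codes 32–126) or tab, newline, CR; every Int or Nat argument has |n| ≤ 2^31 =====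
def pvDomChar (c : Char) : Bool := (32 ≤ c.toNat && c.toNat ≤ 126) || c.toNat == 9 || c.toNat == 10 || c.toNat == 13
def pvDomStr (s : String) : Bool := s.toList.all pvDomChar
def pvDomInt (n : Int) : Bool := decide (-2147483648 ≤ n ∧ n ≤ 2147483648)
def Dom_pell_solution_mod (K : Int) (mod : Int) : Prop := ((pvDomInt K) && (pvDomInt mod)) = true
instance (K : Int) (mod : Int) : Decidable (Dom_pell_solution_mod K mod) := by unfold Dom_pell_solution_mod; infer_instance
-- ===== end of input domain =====

-- B replaces A's iterative LSB-first matrix binary exponentiation by a recursive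
-- MSB-first fast-doubling on a single pair in Z[sqrt 2] (no matrices, no accumulator).

-- ===== PORT A =====
structure M2 where
  a : Int
  b : Int
  c : Int
  d : Int
deriving DecidableEq, Repr

def matMul (A B : M2) (mod : Int) : M2 :=
  ⟨PySem.Int.mod (A.a * B.a + A.b * B.c) mod,
   PySem.Int.mod (A.a * B.b + A.b * B.d) mod,
   PySem.Int.mod (A.c * B.a + A.d * B.c) mod,
   PySem.Int.mod (A.c * B.b + A.d * B.d) mod⟩

-- the 'while n > 0' loop of A's mat_pow ('n >>= 1' on n > 0 is floor division by 2)
def matPowGo (result M : M2) (n : Int) (mod : Int) : M2 :=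
  if _h : 0 < n then
    matPowGo (if PySem.Int.band n 1 = 1 then matMul result M mod else result)
             (matMul M M mod) (PySem.Int.floordiv n 2) mod
  else result
termination_by n.toNat
decreasing_by
  rw [PySem.Int.floordiv_eq_ediv_of_pos (by norm_num)]
  omega

def pell_solution_mod (K : Int) (mod : Int) : Int × Int :=
  let M : M2 := ⟨3, 4, 2, 3⟩
  if K = 1 then (PySem.Int.mod 3 mod, PySem.Int.mod 2 mod)
  else
    let Mk := matPowGo ⟨1, 0, 0, 1⟩ M (K - 1) mod
    (PySem.Int.mod (Mk.a * 3 + Mk.b * 2) mod,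
     PySem.Int.mod (Mk.c * 3 + Mk.d * 2) mod)

-- ===== PORT B =====
-- B's recursive helper pw: (3+2*sqrt2)^n mod m as a pair, recursing on n >> 1
def pellPw (m : Int) (n : Int) : Int × Int :=
  if _h : n ≤ 0 then (PySem.Int.mod 1 m, 0)
  else
    let ab := pellPw m (PySem.Int.floordiv n 2)
    let s : Int × Int := (PySem.Int.mod (ab.1 * ab.1 + 2 * ab.2 * ab.2) m,
                          PySem.Int.mod (2 * ab.1 * ab.2) m)
    if PySem.Int.band n 1 = 1 then
      (PySem.Int.mod (3 * s.1 + 4 * s.2) m, PySem.Int.mod (2 * s.1 + 3 * s.2) m)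
    else s
termination_by n.toNat
decreasing_by
  rw [PySem.Int.floordiv_eq_ediv_of_pos (by norm_num)]
  omega

def pell_solution_mod_alt (K : Int) (mod : Int) : Int × Int :=
  let ab := pellPw mod (K - 1)
  (PySem.Int.mod (3 * ab.1 + 4 * ab.2) mod, PySem.Int.mod (2 * ab.1 + 3 * ab.2) mod)

-- ===== PRECONDITION & SPEC =====
-- Pre_ excludes mod = 0, on which Python A raises ZeroDivisionError.
def Pre_pell_solution_mod (K : Int) (mod : Int) : Prop := mod ≠ 0
instance (K : Int) (mod : Int) : Decidable (Pre_pell_solution_mod K mod) := by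
  unfold Pre_pell_solution_mod; infer_instance

def pvWitness_pell_solution_mod : Int × Int := (5, 7)

def Spec_pell_solution_mod (K : Int) (mod : Int) (out : Int × Int) : Prop := out = pell_solution_mod_alt K mod
instance (K : Int) (mod : Int) (out : Int × Int) : Decidable (Spec_pell_solution_mod K mod out) := by unfold Spec_pell_solution_mod; infer_instance

-- ===== CLAIM (what is proved, stated in full; the proofs are below) =====
def Claim_equal_pell_solution_mod : Prop := ∀ (K : Int) (mod : Int), Dom_pell_solution_mod K mod → Pre_pell_solution_mod K mod → Spec_pell_solution_mod K mod (pell_solution_mod K mod)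

-- ===== LEMMAS AND PROOFS =====

-- Python's % keeps the result congruent to the dividend …
theorem pymod_modeq (a b : Int) : Int.ModEq b (PySem.Int.mod a b) a := by
  have h := PySem.Int.floordiv_mul_add_mod a b
  have h1 : PySem.Int.mod a b = a + b * (-(PySem.Int.floordiv a b)) := by
    have : b * (-(PySem.Int.floordiv a b)) = -(PySem.Int.floordiv a b * b) := by ring
    rw [this]; omega
  unfold Int.ModEq
  rw [h1, Int.add_mul_emod_self_left]

-- … and for b ≠ 0 it is determined by the congruence class.
theorem pymod_congr {a c b : Int} (hb : b ≠ 0) (h : Int.ModEq b a c) :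
    PySem.Int.mod a b = PySem.Int.mod c b := by
  rcases lt_or_gt_of_ne hb with hneg | hpos
  · obtain ⟨ha1, ha2⟩ := PySem.Int.mod_neg_bounds a hneg
    obtain ⟨hc1, hc2⟩ := PySem.Int.mod_neg_bounds c hneg
    have hmm : Int.ModEq b (PySem.Int.mod a b) (PySem.Int.mod c b) :=
      ((pymod_modeq a b).trans h).trans (pymod_modeq c b).symm
    obtain ⟨k, hk⟩ := hmm.dvd
    have hk0 : k = 0 := by
      rcases lt_trichotomy k 0 with h1 | h1 | h1
      · exfalso; nlinarith
      · exact h1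
      · exfalso; nlinarith
    rw [hk0, mul_zero] at hk
    omega
  · rw [PySem.Int.mod_eq_emod_of_pos hpos, PySem.Int.mod_eq_emod_of_pos hpos]
    exact h

-- exact (un-modded) arithmetic in Z[sqrt 2], pairs (a, b) standing for a + b*sqrt 2
def rmul (x y : Int × Int) : Int × Int :=
  (x.1 * y.1 + 2 * x.2 * y.2, x.1 * y.2 + x.2 * y.1)

def rpow (w : Int × Int) : Nat → Int × Int
  | 0 => (1, 0)
  | k + 1 => rmul (rpow w k) w

theorem rmul_one (x : Int × Int) : rmul x (1, 0) = x := by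
  cases x; simp [rmul]

theorem one_rmul (x : Int × Int) : rmul (1, 0) x = x := by
  cases x; simp [rmul]

theorem rmul_assoc (x y z : Int × Int) : rmul (rmul x y) z = rmul x (rmul y z) := by
  simp only [rmul, Prod.mk.injEq]
  exact ⟨by ring, by ring⟩

theorem rpow_add (w : Int × Int) (j k : Nat) : rpow w (j + k) = rmul (rpow w j) (rpow w k) := by
  induction k with
  | zero => simp [rpow, rmul_one]
  | succ k ih =>
      show rpow w (j + k + 1) = _
      rw [rpow, ih, rpow, rmul_assoc]

theorem rpow_succ_left (w : Int × Int) (k : Nat) : rpow w (k + 1) = rmul w (rpow w k) := by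
  have : k + 1 = 1 + k := by omega
  rw [this, rpow_add]
  simp [rpow, one_rmul]

-- componentwise congruence mod m on pairs
def PEq (m : Int) (x y : Int × Int) : Prop :=
  Int.ModEq m x.1 y.1 ∧ Int.ModEq m x.2 y.2

theorem PEq.refl (m : Int) (x : Int × Int) : PEq m x x :=
  ⟨Int.ModEq.refl _, Int.ModEq.refl _⟩

-- invariant of B's recursive fast-doubling helper
theorem pellPw_peq (m : Int) :
    ∀ fuel : Nat, ∀ n : Int, n.toNat ≤ fuel →
      PEq m (pellPw m n) (rpow (3, 2) n.toNat) := by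
  intro fuel
  induction fuel with
  | zero =>
      intro n hn
      have hn0 : n ≤ 0 := by omega
      rw [pellPw, dif_pos hn0]
      have : n.toNat = 0 := by omega
      rw [this]
      exact ⟨(pymod_modeq 1 m), Int.ModEq.refl _⟩
  | succ f ih =>
      intro n hn
      by_cases hpos : n ≤ 0
      · rw [pellPw, dif_pos hpos]
        have : n.toNat = 0 := by omega
        rw [this]
        exact ⟨(pymod_modeq 1 m), Int.ModEq.refl _⟩
      · rw [pellPw, dif_neg hpos]
        have hngt : 0 < n := by omega
        have hfd : PySem.Int.floordiv n 2 = n / 2 := PySem.Int.floordiv_eq_ediv_of_pos (by norm_num)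
        have hband : PySem.Int.band n 1 = PySem.Int.mod n 2 := PySem.Int.band_one n
        have hmod2 : PySem.Int.mod n 2 = n % 2 := PySem.Int.mod_eq_emod_of_pos (by norm_num)
        have hhalf : (n / 2).toNat ≤ f := by omega
        have hIH := ih (n / 2) hhalf
        rw [hfd] at *
        obtain ⟨h1, h2⟩ := hIH
        set t := rpow (3, 2) (n / 2).toNat with ht
        -- the squared pair is congruent to rmul t t = rpow (3,2) (2*(n/2).toNat)
        have hsq1 : Int.ModEq m (PySem.Int.mod ((pellPw m (n / 2)).1 * (pellPw m (n / 2)).1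
              + 2 * (pellPw m (n / 2)).2 * (pellPw m (n / 2)).2) m) (rmul t t).1 :=
          (pymod_modeq _ m).trans (Int.ModEq.add (h1.mul h1) ((Int.ModEq.mul_left 2 h2).mul h2))
        have hsq2 : Int.ModEq m (PySem.Int.mod (2 * (pellPw m (n / 2)).1 * (pellPw m (n / 2)).2) m)
              (rmul t t).2 := by
          refine (pymod_modeq _ m).trans ?_
          have he : (rmul t t).2 = 2 * t.1 * t.2 := by simp only [rmul]; ring
          rw [he]
          exact (Int.ModEq.mul_left 2 h1).mul h2
        have hrt : rmul t t = rpow (3, 2) (2 * (n / 2).toNat) := by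
          have h2k : 2 * (n / 2).toNat = (n / 2).toNat + (n / 2).toNat := by omega
          rw [h2k, rpow_add, ht]
        by_cases hodd : PySem.Int.band n 1 = 1
        · rw [if_pos hodd]
          have hno : n % 2 = 1 := by rw [hband, hmod2] at hodd; exact hodd
          have hnt : n.toNat = 2 * (n / 2).toNat + 1 := by omega
          rw [hnt, rpow_succ_left, ← hrt]
          constructor
          · refine (pymod_modeq _ m).trans ?_
            have he : (rmul (3, 2) (rmul t t)).1 = 3 * (rmul t t).1 + 4 * (rmul t t).2 := by
              simp only [rmul]; ring
            rw [he]
            exact Int.ModEq.add (hsq1.mul_left 3) (hsq2.mul_left 4)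
          · refine (pymod_modeq _ m).trans ?_
            have he : (rmul (3, 2) (rmul t t)).2 = 2 * (rmul t t).1 + 3 * (rmul t t).2 := by
              simp only [rmul]; ring
            rw [he]
            exact Int.ModEq.add (hsq1.mul_left 2) (hsq2.mul_left 3)
        · rw [if_neg hodd]
          have hno : n % 2 = 0 := by rw [hband, hmod2] at hodd; omega
          have hnt : n.toNat = 2 * (n / 2).toNat := by omega
          rw [hnt, ← hrt]
          exact ⟨hsq1, hsq2⟩

-- the same machinery for A's matrix loop, via exact matrix arithmetic
def mmul (X Y : M2) : M2 :=
  ⟨X.a * Y.a + X.b * Y.c, X.a * Y.b + X.b * Y.d,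
   X.c * Y.a + X.d * Y.c, X.c * Y.b + X.d * Y.d⟩

def mpow (M : M2) : Nat → M2
  | 0 => ⟨1, 0, 0, 1⟩
  | k + 1 => mmul (mpow M k) M

theorem mmul_one (X : M2) : mmul X ⟨1, 0, 0, 1⟩ = X := by
  cases X; simp [mmul]

theorem one_mmul (X : M2) : mmul ⟨1, 0, 0, 1⟩ X = X := by
  cases X; simp [mmul]

theorem mmul_assoc (X Y Z : M2) : mmul (mmul X Y) Z = mmul X (mmul Y Z) := by
  simp only [mmul, M2.mk.injEq]
  refine ⟨by ring, by ring, by ring, by ring⟩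

theorem mpow_add (M : M2) (j k : Nat) : mpow M (j + k) = mmul (mpow M j) (mpow M k) := by
  induction k with
  | zero => simp [mpow, mmul_one]
  | succ k ih =>
      show mpow M (j + k + 1) = _
      rw [mpow, ih, mpow, mmul_assoc]

theorem mpow_succ_left (M : M2) (k : Nat) : mpow M (k + 1) = mmul M (mpow M k) := by
  have : k + 1 = 1 + k := by omega
  rw [this, mpow_add]
  simp [mpow, one_mmul]

theorem mpow_sq (M : M2) (k : Nat) : mpow (mmul M M) k = mpow M (2 * k) := by
  induction k with
  | zero => rfl
  | succ k ih =>
      rw [mpow, ih]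
      have h2 : 2 * (k + 1) = (2 * k + 1) + 1 := by omega
      rw [h2, mpow, mpow, mmul_assoc]

-- entrywise congruence mod m
def MEq (m : Int) (X Y : M2) : Prop :=
  Int.ModEq m X.a Y.a ∧ Int.ModEq m X.b Y.b ∧ Int.ModEq m X.c Y.c ∧ Int.ModEq m X.d Y.d

theorem MEq.refl (m : Int) (X : M2) : MEq m X X :=
  ⟨Int.ModEq.refl _, Int.ModEq.refl _, Int.ModEq.refl _, Int.ModEq.refl _⟩

theorem matMul_meq {m : Int} {X X' Y Y' : M2} (hX : MEq m X X') (hY : MEq m Y Y') :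
    MEq m (matMul X Y m) (mmul X' Y') := by
  obtain ⟨ha, hb, hc, hd⟩ := hX
  obtain ⟨ha', hb', hc', hd'⟩ := hY
  refine ⟨?_, ?_, ?_, ?_⟩ <;>
    exact (pymod_modeq _ m).trans (Int.ModEq.add (Int.ModEq.mul ‹_› ‹_›) (Int.ModEq.mul ‹_› ‹_›))

-- invariant of A's binary-exponentiation loop
theorem matPowGo_meq (m : Int) :
    ∀ fuel : Nat, ∀ n : Int, n.toNat ≤ fuel → ∀ R Mc R' Mc', MEq m R R' → MEq m Mc Mc' →
      MEq m (matPowGo R Mc n m) (mmul R' (mpow Mc' n.toNat)) := by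
  intro fuel
  induction fuel with
  | zero =>
      intro n hn R Mc R' Mc' hR hMc
      have hn0 : ¬ 0 < n := by omega
      rw [matPowGo, dif_neg hn0]
      have : n.toNat = 0 := by omega
      rw [this]
      simpa [mpow, mmul_one] using hR
  | succ f ih =>
      intro n hn R Mc R' Mc' hR hMc
      by_cases hpos : 0 < n
      · rw [matPowGo, dif_pos hpos]
        have hfd : PySem.Int.floordiv n 2 = n / 2 := PySem.Int.floordiv_eq_ediv_of_pos (by norm_num)
        have hband : PySem.Int.band n 1 = PySem.Int.mod n 2 := PySem.Int.band_one n
        have hmod2 : PySem.Int.mod n 2 = n % 2 := PySem.Int.mod_eq_emod_of_pos (by norm_num)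
        have hhalf : (n / 2).toNat ≤ f := by omega
        have step := ih (n / 2) hhalf
          (if PySem.Int.band n 1 = 1 then matMul R Mc m else R) (matMul Mc Mc m)
          (if PySem.Int.band n 1 = 1 then mmul R' Mc' else R') (mmul Mc' Mc')
          (by split_ifs with hcond
              · exact matMul_meq hR hMc
              · exact hR)
          (matMul_meq hMc hMc)
        rw [hfd]
        have hrhs : mmul R' (mpow Mc' n.toNat)
            = mmul (if PySem.Int.band n 1 = 1 then mmul R' Mc' else R')
                (mpow (mmul Mc' Mc') (n / 2).toNat) := by
          rw [mpow_sq]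
          by_cases hodd : PySem.Int.band n 1 = 1
          · rw [if_pos hodd]
            have hno : n % 2 = 1 := by rw [hband, hmod2] at hodd; exact hodd
            have hnt : n.toNat = 2 * (n / 2).toNat + 1 := by omega
            rw [hnt, mpow_succ_left, ← mmul_assoc]
          · rw [if_neg hodd]
            have hno : n % 2 = 0 := by rw [hband, hmod2] at hodd; omega
            have hnt : n.toNat = 2 * (n / 2).toNat := by omega
            rw [hnt]
        rw [hrhs]
        exact step
      · rw [matPowGo, dif_neg hpos]
        have : n.toNat = 0 := by omega
        rw [this]
        simpa [mpow, mmul_one] using hR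

-- the matrix power of [[3,4],[2,3]] is the embedding of the ring power of 3+2*sqrt2
theorem mpow_eq_rpow (k : Nat) :
    mpow ⟨3, 4, 2, 3⟩ k = ⟨(rpow (3, 2) k).1, 2 * (rpow (3, 2) k).2, (rpow (3, 2) k).2, (rpow (3, 2) k).1⟩ := by
  induction k with
  | zero => rfl
  | succ k ih =>
      rw [mpow, rpow, ih]
      simp only [mmul, rmul, M2.mk.injEq]
      refine ⟨trivial, by ring, by ring, by ring⟩

-- ===== VERDICT (by name: the statement is the Claim_ definition above) =====
theorem pell_solution_mod_spec : Claim_equal_pell_solution_mod := by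
  intro K m _hdom hm
  unfold Spec_pell_solution_mod pell_solution_mod pell_solution_mod_alt
  obtain ⟨hB1, hB2⟩ := pellPw_peq m (K - 1).toNat (K - 1) le_rfl
  set w : Int × Int := (3, 2) with hw
  set k := (K - 1).toNat with hk
  -- B's output components are mods of values congruent to rpow w (k+1)
  have hBout1 : Int.ModEq m (3 * (pellPw m (K - 1)).1 + 4 * (pellPw m (K - 1)).2)
      (rpow w (k + 1)).1 := by
    rw [rpow_succ_left]
    have he : (rmul w (rpow w k)).1 = 3 * (rpow w k).1 + 4 * (rpow w k).2 := by
      simp only [hw, rmul]; ring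
    rw [he]
    exact Int.ModEq.add (hB1.mul_left 3) (hB2.mul_left 4)
  have hBout2 : Int.ModEq m (2 * (pellPw m (K - 1)).1 + 3 * (pellPw m (K - 1)).2)
      (rpow w (k + 1)).2 := by
    rw [rpow_succ_left]
    have he : (rmul w (rpow w k)).2 = 2 * (rpow w k).1 + 3 * (rpow w k).2 := by
      simp only [hw, rmul]; ring
    rw [he]
    exact Int.ModEq.add (hB1.mul_left 2) (hB2.mul_left 3)
  by_cases hK : K = 1
  · subst hK
    rw [if_pos rfl]
    have hk0 : k = 0 := by simp [hk]
    rw [hk0] at hBout1 hBout2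
    simp only [rpow, rmul, hw] at hBout1 hBout2
    refine Prod.ext ?_ ?_ <;> dsimp only
    · exact pymod_congr hm (hBout1.symm)
    · exact pymod_congr hm (hBout2.symm)
  · rw [if_neg hK]
    have hA := matPowGo_meq m k (K - 1) le_rfl
      ⟨1, 0, 0, 1⟩ ⟨3, 4, 2, 3⟩ ⟨1, 0, 0, 1⟩ ⟨3, 4, 2, 3⟩ (MEq.refl m _) (MEq.refl m _)
    rw [one_mmul, mpow_eq_rpow] at hA
    obtain ⟨ha, hb, hc, hd⟩ := hA
    refine Prod.ext ?_ ?_ <;> dsimp only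
    · refine pymod_congr hm ?_
      refine (Int.ModEq.add (ha.mul_right 3) (hb.mul_right 2)).trans ?_
      refine Int.ModEq.trans ?_ hBout1.symm
      have : (rpow w k).1 * 3 + 2 * (rpow w k).2 * 2 = (rpow w (k + 1)).1 := by
        rw [rpow_succ_left]; simp only [hw, rmul]; ring
      rw [this]
    · refine pymod_congr hm ?_
      refine (Int.ModEq.add (hc.mul_right 3) (hd.mul_right 2)).trans ?_
      refine Int.ModEq.trans ?_ hBout2.symm
      have : (rpow w k).2 * 3 + (rpow w k).1 * 2 = (rpow w (k + 1)).2 := by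
        rw [rpow_succ_left]; simp only [hw, rmul]; ring
      rw [this]
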